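-- pv_equiv track=rewrite | github.com/Aletheia-Verification/Aletheia | jcl_parser.py | _join_continuations
-- ===== SOURCE A (Python) =====
-- def _join_continuations(text: str) -> list:
--     """Pre-join JCL continuation lines.
--
--     Two continuation signals:
--     1. Col 72 is non-blank → next line starts at col 16
--     2. Operand field ends with a comma → next line starts at col 16
--     """
--     raw_lines = text.split("\n")
--     result = []
--     i = 0
--
--     while i < len(raw_lines):
--         line = raw_lines[i]
--
--         # Skip non-JCL lines (don't start with //) and comment lines (//* )
--         if not line.startswith("//") or line.startswith("//*"):
--             result.append(line)
--             i += 1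
--             continue
--
--         # Check for continuation
--         merged = line
--         while i + 1 < len(raw_lines):
--             needs_continuation = False
--
--             # Signal 1: col 72 non-blank (line is at least 72 chars and col 72 is non-blank)
--             if len(merged) >= 72 and merged[71:72].strip():
--                 needs_continuation = True
--
--             # Signal 2: operand field ends with comma
--             stripped = merged.rstrip()
--             if stripped.endswith(","):
--                 needs_continuation = True
--
--             if not needs_continuation:
--                 break
--
--             next_line = raw_lines[i + 1]
--             # Continuation lines start with // and content at col 16
--             if next_line.startswith("//"):
--                 # Strip the // prefix and take content from col 16 onward
--                 if len(next_line) > 15: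
--                     cont_content = next_line[15:].lstrip()
--                 else:
--                     cont_content = next_line[2:].lstrip()
--                 # Trim merged to col 71 if it was a col-72 continuation
--                 if len(merged) >= 72:
--                     merged = merged[:71].rstrip()
--                 merged = merged.rstrip() + cont_content
--             else:
--                 break
--             i += 1
--
--         result.append(merged)
--         i += 1
--
--     return result
-- ===== SOURCE B (Python) =====
-- def _needs_cont(m):
--     return (len(m) >= 72 and bool(m[71:72].strip())) or m.rstrip().endswith(",")
--
--
-- def _merge(m, nxt):
--     cont = nxt[15:].lstrip() if len(nxt) > 15 else nxt[2:].lstrip()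
--     if len(m) >= 72:
--         m = m[:71].rstrip()
--     return m.rstrip() + cont
--
--
-- def _join_continuations(text: str) -> list:
--     """Single forward pass with an explicit 'open record' state."""
--     result = []
--     current = None
--     for line in text.split("\n"):
--         if current is not None:
--             if _needs_cont(current) and line.startswith("//"):
--                 current = _merge(current, line)
--                 continue
--             result.append(current)
--             current = None
--         if line.startswith("//") and not line.startswith("//*"):
--             current = line
--         else:
--             result.append(line)
--     if current is not None:
--         result.append(current)
--     return result
-- ===== Notes on version B (the rewrite author's own statement) =====
-- stated objective: simpler
-- what changed: Replaced A's index-driven outer while loop with a nested look-ahead merge loop by a single forward for-pass over the lines that carries an explicit open-record state (current) and flushes it when a line cannot continue it.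
import Mathlib
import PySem

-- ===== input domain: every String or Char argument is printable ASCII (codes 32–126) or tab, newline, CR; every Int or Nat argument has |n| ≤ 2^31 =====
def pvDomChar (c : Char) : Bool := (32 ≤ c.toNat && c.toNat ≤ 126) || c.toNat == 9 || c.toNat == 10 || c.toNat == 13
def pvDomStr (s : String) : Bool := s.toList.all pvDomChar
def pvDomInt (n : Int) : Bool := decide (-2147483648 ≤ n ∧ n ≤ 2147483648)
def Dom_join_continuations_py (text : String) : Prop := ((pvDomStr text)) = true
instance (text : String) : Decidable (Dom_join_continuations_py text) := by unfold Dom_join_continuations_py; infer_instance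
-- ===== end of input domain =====

-- B replaces A's nested while loops (outer index loop + inner look-ahead merge loop)
-- with a single forward pass carrying an explicit open-record state; objective: simpler.

-- shared per-line helpers (identical expressions appear in both Pythons)
def pvNeedsCont (m : String) : Bool :=
  (decide (72 ≤ PySem.Str.len m) && (PySem.Str.strip (PySem.Str.slice m (some 71) (some 72)) != ""))
    || PySem.Str.endswith (PySem.Str.rstrip m) ","

def pvMerge (m nxt : String) : String :=
  let cont := if 15 < PySem.Str.len nxt then PySem.Str.lstrip (PySem.Str.slice nxt (some 15) none)
              else PySem.Str.lstrip (PySem.Str.slice nxt (some 2) none)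
  let m1 := if 72 ≤ PySem.Str.len m then PySem.Str.rstrip (PySem.Str.slice m none (some 71)) else m
  PySem.Str.rstrip m1 ++ cont

-- ===== PORT A =====
-- A's inner while loop: consume following lines while the merged record signals continuation
def pvInner (m : String) : List String → String × List String
  | [] => (m, [])
  | next :: rest =>
    if pvNeedsCont m then
      if PySem.Str.startswith next "//" then pvInner (pvMerge m next) rest
      else (m, next :: rest)
    else (m, next :: rest)

theorem pvInner_length (m : String) (ls : List String) : (pvInner m ls).2.length ≤ ls.length := by
  induction ls generalizing m with
  | nil => simp [pvInner]
  | cons next rest ih =>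
    simp only [pvInner]
    split
    · split
      · exact le_trans (ih _) (Nat.le_succ _)
      · simp
    · simp

-- A's outer while loop over the line index
def pvJoinA : List String → List String
  | [] => []
  | line :: rest =>
    if !(PySem.Str.startswith line "//") || PySem.Str.startswith line "//*" then
      line :: pvJoinA rest
    else
      (pvInner line rest).1 :: pvJoinA (pvInner line rest).2
termination_by ls => ls.length
decreasing_by
  · simp
  · exact Nat.lt_succ_of_le (pvInner_length line rest)

def join_continuations_py (text : String) : List String :=
  pvJoinA ((PySem.Str.split? text "\n").getD [])

-- ===== PORT B =====
def pvFresh (res : List String) (line : String) : List String × Option String :=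
  if PySem.Str.startswith line "//" && !PySem.Str.startswith line "//*" then (res, some line)
  else (res ++ [line], none)

def pvStepB (st : List String × Option String) (line : String) : List String × Option String :=
  match st with
  | (res, some m) =>
    if pvNeedsCont m && PySem.Str.startswith line "//" then (res, some (pvMerge m line))
    else pvFresh (res ++ [m]) line
  | (res, none) => pvFresh res line

def join_continuations_py_alt (text : String) : List String :=
  let st := ((PySem.Str.split? text "\n").getD []).foldl pvStepB ([], none)
  st.1 ++ st.2.toList

-- ===== PRECONDITION & SPEC =====
def Spec_join_continuations_py (text : String) (out : List String) : Prop := out = join_continuations_py_alt text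
instance (text : String) (out : List String) : Decidable (Spec_join_continuations_py text out) := by unfold Spec_join_continuations_py; infer_instance

-- ===== CLAIM (what is proved, stated in full; the proofs are below) =====
def Claim_equal_join_continuations_py : Prop := ∀ (text : String), Dom_join_continuations_py text → Spec_join_continuations_py text (join_continuations_py text)

-- ===== LEMMAS AND PROOFS =====
def pvFlush (st : List String × Option String) : List String := st.1 ++ st.2.toList

theorem pvMain (ls : List String) :
    (∀ res : List String, pvFlush (ls.foldl pvStepB (res, none)) = res ++ pvJoinA ls) ∧
    (∀ (res : List String) (m : String),
      pvFlush (ls.foldl pvStepB (res, some m)) =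
        res ++ (pvInner m ls).1 :: pvJoinA (pvInner m ls).2) := by
  induction ls with
  | nil => simp [pvFlush, pvJoinA, pvInner]
  | cons line rest ih =>
    have hnone : ∀ res : List String,
        pvFlush ((line :: rest).foldl pvStepB (res, none)) = res ++ pvJoinA (line :: rest) := by
      intro res
      by_cases h1 : PySem.Str.startswith line "//"
      · by_cases h2 : PySem.Str.startswith line "//*"
        · simp at h1 h2
          simp [pvStepB, pvFresh, pvJoinA, h1, h2, ih.1]
        · simp at h1 h2
          simp [pvStepB, pvFresh, pvJoinA, h1, h2, ih.2]
      · simp at h1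
        simp [pvStepB, pvFresh, pvJoinA, h1, ih.1]
    refine ⟨hnone, ?_⟩
    intro res m
    by_cases hc : pvNeedsCont m ∧ PySem.Str.startswith line "//"
    · obtain ⟨hn, hs⟩ := hc
      simp at hs
      have hfold : (line :: rest).foldl pvStepB (res, some m)
          = rest.foldl pvStepB (res, some (pvMerge m line)) := by
        simp [pvStepB, hn, hs]
      rw [hfold, ih.2]
      simp [pvInner, hn, hs]
    · have hstep : pvStepB (res, some m) line = pvFresh (res ++ [m]) line := by
        simp only [pvStepB]
        rw [if_neg]
        simp only [Bool.and_eq_true]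
        exact hc
      have h2 : (line :: rest).foldl pvStepB (res, some m)
          = (line :: rest).foldl pvStepB (res ++ [m], none) := by
        rw [List.foldl_cons, hstep, List.foldl_cons]
        rfl
      rw [h2, hnone]
      have hinner : pvInner m (line :: rest) = (m, line :: rest) := by
        simp only [pvInner]
        by_cases hn : pvNeedsCont m
        · have hs : ¬ PySem.Str.startswith line "//" = true := fun hs => hc ⟨hn, hs⟩
          simp at hs
          simp [hn, hs]
        · simp [hn]
      simp [hinner]

-- ===== VERDICT (by name: the statement is the Claim_ definition above) =====
theorem join_continuations_py_spec : Claim_equal_join_continuations_py := by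
  intro text _
  unfold Spec_join_continuations_py join_continuations_py join_continuations_py_alt
  have := (pvMain ((PySem.Str.split? text "\n").getD [])).1 []
  simpa [pvFlush] using this.symm
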